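-- pv_equiv track=rewrite | github.com/robbsolo/Matrix-Math | gauss_seidel.py | tril
-- ===== SOURCE A (Python) =====
-- def tril(m):
--     m2 = [0] * len(m)
--     for i in range(len(m2)):
--         m2[i] = [0] * len(m[0])
--     for i in range(len(m)):
--         for j in range(len(m[0])):
--             if i == j:
--                 m2[i][j] = m[i][j]
--             elif j < i:
--                 m2[i][j] = m[i][j]
--     return m2
-- ===== SOURCE B (Python) =====
-- def tril(m):
--     # Build each row by slicing the kept lower part and padding with zeros to the
--     # width of the first row (len(m[0]) evaluated inside the body: empty m -> []).
--     return [(row[:i + 1] + [0] * len(m[0]))[:len(m[0])] for i, row in enumerate(m)]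
-- ===== Notes on version B (the rewrite author's own statement) =====
-- stated objective: simpler
-- what changed: Replaces the preallocate-then-mutate nested loops with per-cell i==j/j<i branches by a single comprehension that builds each row as slice-the-lower-part plus zero padding (truncated to the first row's width).
import Mathlib
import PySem

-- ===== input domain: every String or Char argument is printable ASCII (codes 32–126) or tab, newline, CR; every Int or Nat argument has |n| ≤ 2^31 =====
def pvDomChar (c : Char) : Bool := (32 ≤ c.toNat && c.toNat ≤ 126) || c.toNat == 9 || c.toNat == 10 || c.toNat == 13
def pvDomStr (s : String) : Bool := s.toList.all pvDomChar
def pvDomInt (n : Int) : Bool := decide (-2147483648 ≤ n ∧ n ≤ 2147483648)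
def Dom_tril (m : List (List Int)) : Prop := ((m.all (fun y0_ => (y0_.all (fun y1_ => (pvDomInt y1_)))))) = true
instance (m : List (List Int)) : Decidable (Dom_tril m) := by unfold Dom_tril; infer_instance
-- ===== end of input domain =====

-- B builds each row by slicing the kept lower part and padding with zeros, instead of
-- A's preallocate-then-mutate nested loops with per-cell branches (objective: simpler).

-- ===== PORT A =====
-- Python's `m2 = [0] * len(m)` holds int placeholders that the first loop always
-- overwrites; we use `[]` placeholders to keep the type. `m[i]`/`m2[i]` are always in
-- range; `m[i][j]` is in range under Pre_tril, so `List.getD` is exact there.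
def tril (m : List (List Int)) : List (List Int) :=
  let m2 : List (List Int) := List.replicate m.length []
  let m2 := (List.range m2.length).foldl
    (fun m2 i => m2.set i (List.replicate (m.headD []).length 0)) m2
  (List.range m.length).foldl (fun m2 i =>
    (List.range (m.headD []).length).foldl (fun m2 j =>
      if i = j then m2.set i ((m2.getD i []).set j ((m.getD i []).getD j 0))
      else if j < i then m2.set i ((m2.getD i []).set j ((m.getD i []).getD j 0))
      else m2) m2) m2

-- ===== PORT B =====
-- [(row[:i+1] + [0]*len(m[0]))[:len(m[0])] for i, row in enumerate(m)]
def tril_alt (m : List (List Int)) : List (List Int) :=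
  (PySem.List.enumerate m).map (fun p =>
    PySem.List.slice
      (PySem.List.slice p.2 none (some (p.1 + 1)) ++ List.replicate (m.headD []).length 0)
      none (some ((m.headD []).length : Int)))

-- ===== PRECONDITION & SPEC =====
-- Pre_tril holds exactly when A returns: each row i must reach index min(i, len(m[0])-1),
-- i.e. have length ≥ min (i+1) (len(m[0])); otherwise A raises IndexError.
def Pre_tril (m : List (List Int)) : Prop :=
  ∀ i < m.length, min (i + 1) (m.headD []).length ≤ (m.getD i []).length
instance (m : List (List Int)) : Decidable (Pre_tril m) := by unfold Pre_tril; infer_instance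
def pvWitness_tril : List (List Int) := [[1, 2, 3], [4, 5, 6], [7, 8, 9]]
def Spec_tril (m : List (List Int)) (out : List (List Int)) : Prop := out = tril_alt m
instance (m : List (List Int)) (out : List (List Int)) : Decidable (Spec_tril m out) := by unfold Spec_tril; infer_instance

-- ===== CLAIM (what is proved, stated in full; the proofs are below) =====
def Claim_equal_tril : Prop := ∀ (m : List (List Int)), Dom_tril m → Pre_tril m → Spec_tril m (tril m)

-- ===== LEMMAS AND PROOFS =====

-- Inner loop of A: repeated `m2[i][j] = …` collapses to one `set` at row i.
theorem inner_collapse (v : Nat → Int) (i : Nat) :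
    ∀ (js : List Nat) (m2 : List (List Int)), i < m2.length →
    js.foldl (fun m2 j =>
      if i = j then m2.set i ((m2.getD i []).set j (v j))
      else if j < i then m2.set i ((m2.getD i []).set j (v j))
      else m2) m2
    = m2.set i (js.foldl (fun r j =>
        if i = j then r.set j (v j)
        else if j < i then r.set j (v j)
        else r) (m2.getD i [])) := by
  intro js
  induction js with
  | nil =>
    intro m2 h
    simp [List.foldl]
    exact (List.set_getElem_self (by omega)).symm.trans (by
      congr 1
      simp [List.getElem?_eq_getElem (by omega : i < m2.length)])
  | cons j js ih =>
    intro m2 h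
    by_cases hij : i = j
    · simp only [List.foldl, if_pos hij]
      rw [ih _ (by simpa using h)]
      rw [List.set_set]
      congr 1
      simp [List.getD_eq_getElem?_getD, List.getElem?_set_self (by omega : i < m2.length)]
    · by_cases hji : j < i
      · simp only [List.foldl, if_neg hij, if_pos hji]
        rw [ih _ (by simpa using h)]
        rw [List.set_set]
        congr 1
        simp [List.getD_eq_getElem?_getD, List.getElem?_set_self (by omega : i < m2.length)]
      · simp only [List.foldl, if_neg hij, if_neg hji]
        exact ih m2 h

-- getElem? characterisation of a fold that sets index i to g i (old row i), i = 0..n-1.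
theorem setFold_getElem? (g : Nat → List Int → List Int) :
    ∀ (n : Nat) (l0 : List (List Int)) (k : Nat),
    ((List.range n).foldl (fun m2 i => m2.set i (g i (m2.getD i []))) l0)[k]?
    = if k < n ∧ k < l0.length then some (g k (l0.getD k [])) else l0[k]? := by
  intro n
  induction n with
  | zero => intro l0 k; simp
  | succ n ih =>
    intro l0 k
    rw [List.range_succ, List.foldl_append]
    simp only [List.foldl]
    have hlen : ((List.range n).foldl (fun m2 i => m2.set i (g i (m2.getD i []))) l0).length = l0.length := by
      clear ih
      induction n with
      | zero => simp
      | succ n ih2 =>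
        rw [List.range_succ, List.foldl_append]
        simp only [List.foldl]
        rw [List.length_set]
        exact ih2
    have hget : ((List.range n).foldl (fun m2 i => m2.set i (g i (m2.getD i []))) l0).getD n []
        = l0.getD n [] := by
      rw [List.getD_eq_getElem?_getD, List.getD_eq_getElem?_getD, ih l0 n]
      have : ¬ (n < n ∧ n < l0.length) := by omega
      rw [if_neg this]
    rw [List.getElem?_set]
    rw [hget, hlen]
    by_cases hnk : n = k
    · subst hnk
      by_cases hkl : n < l0.length <;> simp [hkl]
    · simp only [if_neg hnk, ih l0 k]
      by_cases hk : k < n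
      · simp [hk, Nat.lt_succ_of_lt hk]
      · have : ¬ k < n + 1 := by omega
        simp [hk, this]

theorem setFold_length (g : Nat → List Int → List Int) :
    ∀ (n : Nat) (l0 : List (List Int)),
    ((List.range n).foldl (fun m2 i => m2.set i (g i (m2.getD i []))) l0).length = l0.length := by
  intro n
  induction n with
  | zero => simp
  | succ n ih =>
    intro l0
    rw [List.range_succ, List.foldl_append]
    simp only [List.foldl]
    rw [List.length_set]
    exact ih l0

-- Row fold (inner loop restricted to one row): getElem? characterisation.
theorem rowFold_getElem? (v : Nat → Int) (i : Nat) :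
    ∀ (n : Nat) (r0 : List Int) (k : Nat),
    ((List.range n).foldl (fun r j =>
      if i = j then r.set j (v j)
      else if j < i then r.set j (v j)
      else r) r0)[k]?
    = if k < n ∧ k ≤ i ∧ k < r0.length then some (v k) else r0[k]? := by
  intro n
  induction n with
  | zero => intro r0 k; simp
  | succ n ih =>
    intro r0 k
    rw [List.range_succ, List.foldl_append]
    simp only [List.foldl]
    have hlen : ((List.range n).foldl (fun r j =>
        if i = j then r.set j (v j) else if j < i then r.set j (v j) else r) r0).length = r0.length := by
      clear ih
      induction n with
      | zero => simp
      | succ n ih2 =>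
        rw [List.range_succ, List.foldl_append]
        simp only [List.foldl]
        split_ifs <;> first | (rw [List.length_set]; exact ih2) | exact ih2
    by_cases hni : n ≤ i
    · have hstep : (if i = n then
          ((List.range n).foldl (fun r j => if i = j then r.set j (v j) else if j < i then r.set j (v j) else r) r0).set n (v n)
        else if n < i then
          ((List.range n).foldl (fun r j => if i = j then r.set j (v j) else if j < i then r.set j (v j) else r) r0).set n (v n)
        else ((List.range n).foldl (fun r j => if i = j then r.set j (v j) else if j < i then r.set j (v j) else r) r0))
        = ((List.range n).foldl (fun r j => if i = j then r.set j (v j) else if j < i then r.set j (v j) else r) r0).set n (v n) := by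
        rcases Nat.lt_or_ge n i with h | h
        · simp [h]
        · have : i = n := by omega
          simp [this]
      rw [hstep, List.getElem?_set, hlen, ih]
      by_cases hnk : n = k
      · subst hnk
        rw [if_pos rfl]
        by_cases hkl : n < r0.length
        · have h2 : n < n + 1 ∧ n ≤ i ∧ n < r0.length := ⟨by omega, hni, hkl⟩
          rw [if_pos hkl, if_pos h2]
        · have h2 : ¬ (n < n + 1 ∧ n ≤ i ∧ n < r0.length) := by omega
          rw [if_neg hkl, if_neg h2]
          exact (List.getElem?_eq_none (by omega)).symm
      · rw [if_neg hnk]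
        by_cases hk : k < n ∧ k ≤ i ∧ k < r0.length
        · have h2 : k < n + 1 ∧ k ≤ i ∧ k < r0.length := ⟨by omega, hk.2⟩
          rw [if_pos hk, if_pos h2]
        · have h2 : ¬ (k < n + 1 ∧ k ≤ i ∧ k < r0.length) := by
            intro h; exact hk ⟨by omega, h.2⟩
          rw [if_neg hk, if_neg h2]
    · have h1 : ¬ i = n := by omega
      have h2 : ¬ n < i := by omega
      rw [if_neg h1, if_neg h2, ih]
      by_cases hk : k < n ∧ k ≤ i ∧ k < r0.length
      · have h3 : k < n + 1 ∧ k ≤ i ∧ k < r0.length := ⟨by omega, hk.2⟩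
        rw [if_pos hk, if_pos h3]
      · have h3 : ¬ (k < n + 1 ∧ k ≤ i ∧ k < r0.length) := by
          intro h
          rcases h with ⟨ha, hb, hc⟩
          exact hk ⟨by omega, hb, hc⟩
        rw [if_neg hk, if_neg h3]

-- A in closed set-fold form.
theorem tril_eq_setFold (m : List (List Int)) :
    tril m = (List.range m.length).foldl
      (fun m2 i => m2.set i ((List.range (m.headD []).length).foldl (fun r j =>
        if i = j then r.set j ((m.getD i []).getD j 0)
        else if j < i then r.set j ((m.getD i []).getD j 0)
        else r) (m2.getD i []))) 
      ((List.range m.length).foldl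
        (fun m2 i => m2.set i (List.replicate (m.headD []).length 0))
        (List.replicate m.length ([] : List Int))) := by
  unfold tril
  simp only [List.length_replicate]
  set base := ((List.range m.length).foldl
        (fun m2 i => m2.set i (List.replicate (m.headD []).length 0))
        (List.replicate m.length ([] : List Int))) with hbase
  -- congruence over the outer fold, using that every visited index is < current length
  have key : ∀ (l : List Nat) (m2 : List (List Int)), (∀ i ∈ l, i < m2.length) →
      l.foldl (fun m2 i =>
        (List.range (m.headD []).length).foldl (fun m2 j =>
          if i = j then m2.set i ((m2.getD i []).set j ((m.getD i []).getD j 0))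
          else if j < i then m2.set i ((m2.getD i []).set j ((m.getD i []).getD j 0))
          else m2) m2) m2
      = l.foldl (fun m2 i => m2.set i ((List.range (m.headD []).length).foldl (fun r j =>
          if i = j then r.set j ((m.getD i []).getD j 0)
          else if j < i then r.set j ((m.getD i []).getD j 0)
          else r) (m2.getD i []))) m2 := by
    intro l
    induction l with
    | nil => intro m2 _; rfl
    | cons i l ih =>
      intro m2 hmem
      simp only [List.foldl]
      rw [inner_collapse (fun j => (m.getD i []).getD j 0) i _ m2 (hmem i (by simp))]
      exact ih _ (by
        intro x hx
        rw [List.length_set]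
        exact hmem x (List.mem_cons_of_mem _ hx))
  refine key (List.range m.length) base ?_
  intro i hi
  have hb : base.length = m.length := by
    rw [hbase]
    exact (setFold_length (fun _ _ => List.replicate (m.headD []).length 0) m.length _).trans
      (by simp)
  rw [hb]
  simpa using hi

-- Row k of A equals row k of B: triangular fold over a zero row = slice-and-pad.
theorem row_eq (row : List Int) (kk c : Nat) (h : min (kk + 1) c ≤ row.length) :
    (List.range c).foldl (fun r j =>
      if kk = j then r.set j (row.getD j 0)
      else if j < kk then r.set j (row.getD j 0)
      else r) (List.replicate c 0)
    = (row.take (kk + 1) ++ List.replicate c 0).take c := by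
  apply List.ext_getElem?
  intro j
  rw [rowFold_getElem? (fun j => row.getD j 0) kk c (List.replicate c (0:Int)) j]
  rw [List.getElem?_take, List.getElem?_append, List.length_take]
  simp only [List.length_replicate]
  by_cases hjc : j < c
  · rw [if_pos hjc]
    by_cases hjk : j ≤ kk
    · have hjr : j < row.length := by omega
      have hjt : j < min (kk + 1) row.length := by omega
      rw [if_pos ⟨hjc, hjk, hjc⟩, if_pos hjt, List.getElem?_take, if_pos (by omega : j < kk + 1)]
      rw [List.getElem?_eq_getElem hjr, List.getD_eq_getElem row 0 hjr]
    · have h1 : ¬ (j < c ∧ j ≤ kk ∧ j < c) := by omega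
      have h2 : ¬ j < min (kk + 1) row.length := by omega
      have h3 : j - min (kk + 1) row.length < c := by omega
      rw [if_neg h1, if_neg h2]
      simp [hjc, h3]
  · rw [if_neg hjc, if_neg (by omega : ¬ (j < c ∧ j ≤ kk ∧ j < c)), List.getElem?_replicate,
      if_neg hjc]

-- ===== VERDICT (by name: the statement is the Claim_ definition above) =====
theorem tril_spec : Claim_equal_tril := by
  intro m _ hpre
  unfold Spec_tril
  rw [tril_eq_setFold]
  apply List.ext_getElem?
  intro k
  have hbl : ((List.range m.length).foldl
      (fun m2 i => m2.set i (List.replicate (m.headD []).length 0))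
      (List.replicate m.length ([] : List Int))).length = m.length := by
    exact (setFold_length (fun _ _ => List.replicate (m.headD []).length 0) m.length _).trans
      (by simp)
  have hbget : ∀ kk, kk < m.length → ((List.range m.length).foldl
      (fun m2 i => m2.set i (List.replicate (m.headD []).length 0))
      (List.replicate m.length ([] : List Int))).getD kk []
      = List.replicate (m.headD []).length 0 := by
    intro kk hkk
    have h := setFold_getElem? (fun _ _ => List.replicate (m.headD []).length 0) m.length
      (List.replicate m.length ([] : List Int)) kk
    rw [List.getD_eq_getElem?_getD, h]
    simp [hkk]
  have hA : ((List.range m.length).foldl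
      (fun m2 i => m2.set i ((List.range (m.headD []).length).foldl (fun r j =>
        if i = j then r.set j ((m.getD i []).getD j 0)
        else if j < i then r.set j ((m.getD i []).getD j 0)
        else r) (m2.getD i [])))
      ((List.range m.length).foldl
        (fun m2 i => m2.set i (List.replicate (m.headD []).length 0))
        (List.replicate m.length ([] : List Int))))[k]?
      = if k < m.length ∧ k < ((List.range m.length).foldl
          (fun m2 i => m2.set i (List.replicate (m.headD []).length 0))
          (List.replicate m.length ([] : List Int))).length then
          some ((List.range (m.headD []).length).foldl (fun r j =>
            if k = j then r.set j ((m.getD k []).getD j 0)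
            else if j < k then r.set j ((m.getD k []).getD j 0)
            else r) (((List.range m.length).foldl
              (fun m2 i => m2.set i (List.replicate (m.headD []).length 0))
              (List.replicate m.length ([] : List Int))).getD k []))
        else ((List.range m.length).foldl
          (fun m2 i => m2.set i (List.replicate (m.headD []).length 0))
          (List.replicate m.length ([] : List Int)))[k]? :=
    setFold_getElem? (fun i r => (List.range (m.headD []).length).foldl (fun r j =>
      if i = j then r.set j ((m.getD i []).getD j 0)
      else if j < i then r.set j ((m.getD i []).getD j 0)
      else r) r) m.length _ k
  rw [hA, hbl]
  unfold tril_alt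
  rw [List.getElem?_map, PySem.List.getElem?_enumerate]
  by_cases hk : k < m.length
  · rw [if_pos ⟨hk, hk⟩, hbget k hk]
    rw [List.getElem?_eq_getElem hk]
    simp only [Option.map]
    congr 1
    have hrow : m[k] = m.getD k [] := (List.getD_eq_getElem m [] hk).symm
    rw [row_eq (m.getD k []) k (m.headD []).length (hpre k hk)]
    rw [show ((0:Int) + (k:Int) + 1) = (((k+1 : Nat)):Int) by push_cast; ring]
    rw [PySem.List.slice_to_natCast, PySem.List.slice_to_natCast, hrow]
  · rw [if_neg (by omega : ¬ (k < m.length ∧ k < m.length))]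
    have h := setFold_getElem? (fun _ _ => List.replicate (m.headD []).length 0) m.length
      (List.replicate m.length ([] : List Int)) k
    rw [h, List.getElem?_eq_none (by omega : m.length ≤ k)]
    simp [hk]
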